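-- pv_equiv track=rewrite | github.com/DefenseIsAlie/AI-Lab | Lab-3/21.py | stateNeighbors
-- ===== SOURCE A (Python) =====
-- from itertools import combinations
--
-- def stateNeighbors(state : list, bitflips : int) -> list:
--     """
--     Return the neighbors of a state. which are the possible states after
--     flipping a bit.
--     bitflips : number of bitflips to be made.
--     """
--     neighbors = []
--     comb = combinations(range(len(state)), bitflips)
--     for i in list(comb):
--         neighbor = list(state)
--         for j in i:
--             neighbor[j] = (neighbor[j]+1)%2
--         neighbors.append(neighbor)
--     return neighbors
-- ===== SOURCE B (Python) =====
-- def stateNeighbors(state : list, bitflips : int) -> list: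
--     """
--     Return the neighbors of a state: all states obtained by flipping
--     exactly `bitflips` bits, via a recursive subset enumerator instead
--     of itertools.combinations.
--     """
--     def go(s, k):
--         if k == 0:
--             return [list(s)]
--         if not s:
--             return []
--         x, rest = s[0], s[1:]
--         flipped = [[(x + 1) % 2] + tail for tail in go(rest, k - 1)]
--         kept = [[x] + tail for tail in go(rest, k)]
--         return flipped + kept
--     return go(state, bitflips)
-- ===== Notes on version B (the rewrite author's own statement) =====
-- stated objective: alternative
-- what changed: Replaced the itertools.combinations-over-indices loop (which copies the state and mutates it at each chosen index) with a direct structural recursion over the state list that, for each position, either flips the head or keeps it and prepends it to recursively built neighbor tails.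
import Mathlib
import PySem

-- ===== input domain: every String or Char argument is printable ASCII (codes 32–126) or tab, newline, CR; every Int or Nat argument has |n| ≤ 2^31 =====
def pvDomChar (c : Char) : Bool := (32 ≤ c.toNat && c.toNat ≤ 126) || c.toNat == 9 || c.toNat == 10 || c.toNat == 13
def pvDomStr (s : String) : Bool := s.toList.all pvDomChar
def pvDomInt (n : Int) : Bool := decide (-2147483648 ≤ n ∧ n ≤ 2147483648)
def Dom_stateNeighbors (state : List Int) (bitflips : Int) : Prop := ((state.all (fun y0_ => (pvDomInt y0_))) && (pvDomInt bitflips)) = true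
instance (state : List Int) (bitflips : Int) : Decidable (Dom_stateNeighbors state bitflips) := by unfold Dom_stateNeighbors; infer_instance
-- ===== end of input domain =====

-- B replaces the itertools.combinations driver by a direct structural recursion over the
-- state list that builds each neighbor front-to-back (alternative decomposition, same cost).


-- ===== PORT A =====
-- itertools.combinations(range(n), r) in lexicographic order (faithful model of the library call)
def pyCombinations (xs : List Nat) (k : Nat) : List (List Nat) :=
  match k, xs with
  | 0, _ => [[]]
  | _ + 1, [] => []
  | k + 1, x :: rest => (pyCombinations rest k).map (fun c => x :: c) ++ pyCombinations rest (k + 1)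

-- the inner 'for j in i: neighbor[j] = (neighbor[j]+1)%2' loop; every j is in range
def flipAt (nb : List Int) (j : Nat) : List Int :=
  nb.set j (PySem.Int.mod (nb.getD j 0 + 1) 2)

def stateNeighbors (state : List Int) (bitflips : Int) : List (List Int) :=
  -- on bitflips < 0 Python raises ValueError (excluded by Pre_); toNat here is harmless
  (pyCombinations (List.range state.length) bitflips.toNat).map
    (fun i => i.foldl flipAt state)

-- ===== PORT B =====
def altGo (s : List Int) (k : Int) : List (List Int) :=
  if k = 0 then [s]
  else
    match s with
    | [] => []
    | x :: rest =>
      ((altGo rest (k - 1)).map (fun t => PySem.Int.mod (x + 1) 2 :: t)) ++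
      ((altGo rest k).map (fun t => x :: t))

def stateNeighbors_alt (state : List Int) (bitflips : Int) : List (List Int) :=
  altGo state bitflips

-- ===== PRECONDITION & SPEC =====
-- Pre_ excludes bitflips < 0, on which itertools.combinations raises ValueError (A returns nothing).
def Pre_stateNeighbors (state : List Int) (bitflips : Int) : Prop := 0 ≤ bitflips
instance (state : List Int) (bitflips : Int) : Decidable (Pre_stateNeighbors state bitflips) := by unfold Pre_stateNeighbors; infer_instance
def pvWitness_stateNeighbors : List Int × Int := ([0, 1, 1], 2)

def Spec_stateNeighbors (state : List Int) (bitflips : Int) (out : List (List Int)) : Prop := out = stateNeighbors_alt state bitflips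
instance (state : List Int) (bitflips : Int) (out : List (List Int)) : Decidable (Spec_stateNeighbors state bitflips out) := by unfold Spec_stateNeighbors; infer_instance

-- ===== CLAIM (what is proved, stated in full; the proofs are below) =====
def Claim_equal_stateNeighbors : Prop := ∀ (state : List Int) (bitflips : Int), Dom_stateNeighbors state bitflips → Pre_stateNeighbors state bitflips → Spec_stateNeighbors state bitflips (stateNeighbors state bitflips)

-- ===== LEMMAS AND PROOFS =====

-- mapping an index transform through pyCombinations
lemma pyCombinations_map (f : Nat → Nat) (xs : List Nat) (k : Nat) :
    pyCombinations (xs.map f) k = (pyCombinations xs k).map (List.map f) := by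
  induction xs generalizing k with
  | nil => cases k <;> simp [pyCombinations]
  | cons x rest ih =>
    cases k with
    | zero => simp [pyCombinations]
    | succ k => simp [pyCombinations, ih, Function.comp_def]

-- flipping only at successor indices leaves the head alone
lemma foldl_flipAt_succ (c : List Nat) (y : Int) (s : List Int) :
    (c.map Nat.succ).foldl flipAt (y :: s) = y :: c.foldl flipAt s := by
  induction c generalizing s with
  | nil => rfl
  | cons j c ih => simp [flipAt, List.foldl_cons, ih]

-- core equivalence: B's recursion = A's combination-and-flip pipeline
lemma altGo_eq (s : List Int) (n : Nat) :
    altGo s (n : Int) =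
      (pyCombinations (List.range s.length) n).map (fun i => i.foldl flipAt s) := by
  induction s generalizing n with
  | nil =>
    cases n with
    | zero => simp [altGo, pyCombinations]
    | succ n =>
      rw [altGo]
      simp [pyCombinations]
      omega
  | cons x rest ih =>
    cases n with
    | zero => simp [altGo, pyCombinations]
    | succ n =>
      rw [altGo]
      have hne : ((n : Int) + 1) ≠ 0 := by omega
      have h1 : ((n : Int) + 1) - 1 = (n : Int) := by omega
      have e2 : altGo rest ((n : Int) + 1) =
          (pyCombinations (List.range rest.length) (n + 1)).map
            (fun i => i.foldl flipAt rest) := by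
        have := ih (n + 1); push_cast at this; exact this
      push_cast
      rw [if_neg hne, h1, ih n, e2, List.length_cons, List.range_succ_eq_map,
          pyCombinations, pyCombinations_map, pyCombinations_map]
      simp only [List.map_append, List.map_map, Function.comp_def]
      congr 1
      · apply List.map_congr_left
        intro c _
        have : List.foldl flipAt (x :: rest) (0 :: c.map Nat.succ) =
            PySem.Int.mod (x + 1) 2 :: c.foldl flipAt rest := by
          rw [List.foldl_cons]
          show (c.map Nat.succ).foldl flipAt (PySem.Int.mod (x + 1) 2 :: rest) = _
          exact foldl_flipAt_succ c _ rest
        exact this.symm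
      · apply List.map_congr_left
        intro c _
        exact (foldl_flipAt_succ c x rest).symm

-- ===== VERDICT (by name: the statement is the Claim_ definition above) =====
theorem stateNeighbors_spec : Claim_equal_stateNeighbors := by
  intro state bitflips _ hpre
  unfold Spec_stateNeighbors stateNeighbors stateNeighbors_alt
  have h : (bitflips.toNat : Int) = bitflips := Int.toNat_of_nonneg hpre
  have e := altGo_eq state bitflips.toNat
  rw [h] at e
  exact e.symm
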